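-- pv_equiv track=rewrite | github.com/CodeAlexx/Eri-Rpg | erirpg/parsers/mojo.py | _extract_indented_block
-- ===== SOURCE A (Python) =====
-- def _extract_indented_block(source: str, start: int) -> str:
--     """Extract an indented block starting at position."""
--     lines = source[start:].split("\n")
--     if not lines:
--         return ""
--
--     result = []
--     in_block = False
--     base_indent = None
--
--     for line in lines[1:]:  # Skip the first line (the header)
--         if not line.strip():
--             if in_block:
--                 result.append(line)
--             continue
--
--         # Calculate indentation
--         stripped = line.lstrip()
--         indent = len(line) - len(stripped)
--
--         if base_indent is None:
--             base_indent = indent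
--             in_block = True
--
--         if indent >= base_indent:
--             result.append(line)
--             in_block = True
--         else:
--             break  # End of block
--
--     return "\n".join(result)
-- ===== SOURCE B (Python) =====
-- def _extract_indented_block(source: str, start: int) -> str:
--     """Extract an indented block starting at position."""
--     lines = source[start:].split("\n")[1:]
--     # drop leading blank lines
--     while lines and not lines[0].strip():
--         lines = lines[1:]
--     if not lines:
--         return ""
--     base = len(lines[0]) - len(lines[0].lstrip())
--     block = []
--     for line in lines:
--         if line.strip() and len(line) - len(line.lstrip()) < base:
--             break
--         block.append(line)
--     return "\n".join(block)
-- ===== Notes on version B (the rewrite author's own statement) =====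
-- stated objective: simpler
-- what changed: Replaced the flag-driven accumulator loop (in_block flag, Optional base_indent mutated mid-loop) with a direct decomposition: drop leading blank lines, read the base indent off the first remaining line, then take lines until the first less-indented non-blank line.
import Mathlib
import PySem

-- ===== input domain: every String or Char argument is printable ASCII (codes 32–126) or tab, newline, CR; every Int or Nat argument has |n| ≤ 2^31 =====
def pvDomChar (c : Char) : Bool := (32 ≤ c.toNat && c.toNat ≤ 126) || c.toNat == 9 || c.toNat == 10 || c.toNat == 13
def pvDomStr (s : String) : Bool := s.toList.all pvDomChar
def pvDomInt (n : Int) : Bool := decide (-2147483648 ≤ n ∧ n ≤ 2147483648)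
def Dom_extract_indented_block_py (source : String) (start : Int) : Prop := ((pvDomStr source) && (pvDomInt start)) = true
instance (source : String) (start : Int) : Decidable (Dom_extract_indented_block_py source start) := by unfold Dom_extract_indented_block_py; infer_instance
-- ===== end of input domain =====

-- B replaces A's flag-driven accumulator loop with dropWhile-blank + takeWhile decomposition (objective: simpler).


-- ===== PORT A =====
-- A's for-loop over lines[1:] with state (result, in_block, base_indent); `break` = returning res.
def pvALoop : List (List Char) → List (List Char) → Bool → Option Nat → List (List Char)
  | [], res, _, _ => res
  | l :: rest, res, inb, base =>
    if PySem.Chars.strip l = [] then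
      pvALoop rest (if inb then res ++ [l] else res) inb base
    else
      let stripped := PySem.Chars.lstrip l
      let indent := l.length - stripped.length
      let base' := base.getD indent
      if base' ≤ indent then
        pvALoop rest (res ++ [l]) true (some base')
      else
        res

def extract_indented_block_py (source : String) (start : Int) : String :=
  let lines := PySem.Chars.splitOn (PySem.List.slice source.toList (some start) none) ['\n']
  if lines = [] then ""
  else String.ofList (PySem.Chars.join ['\n'] (pvALoop (lines.drop 1) [] false none))

-- ===== PORT B =====
def pvBlank (l : List Char) : Bool := PySem.Chars.strip l == []
def pvIndent (l : List Char) : Nat := l.length - (PySem.Chars.lstrip l).length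

def extract_indented_block_py_alt (source : String) (start : Int) : String :=
  let lines := (PySem.Chars.splitOn (PySem.List.slice source.toList (some start) none) ['\n']).drop 1
  let body := lines.dropWhile pvBlank
  match body with
  | [] => ""
  | h :: _ =>
    let base := pvIndent h
    String.ofList (PySem.Chars.join ['\n'] (body.takeWhile (fun l => pvBlank l || decide (base ≤ pvIndent l))))

-- ===== PRECONDITION & SPEC =====
def Spec_extract_indented_block_py (source : String) (start : Int) (out : String) : Prop := out = extract_indented_block_py_alt source start
instance (source : String) (start : Int) (out : String) : Decidable (Spec_extract_indented_block_py source start out) := by unfold Spec_extract_indented_block_py; infer_instance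

-- ===== CLAIM (what is proved, stated in full; the proofs are below) =====
def Claim_equal_extract_indented_block_py : Prop := ∀ (source : String) (start : Int), Dom_extract_indented_block_py source start → Spec_extract_indented_block_py source start (extract_indented_block_py source start)

-- ===== LEMMAS AND PROOFS =====

-- Phase 2 of A (base set, in_block true) is a takeWhile.
theorem pvALoop_phase2 (ls : List (List Char)) (res : List (List Char)) (b : Nat) :
    pvALoop ls res true (some b) = res ++ ls.takeWhile (fun l => pvBlank l || decide (b ≤ pvIndent l)) := by
  induction ls generalizing res with
  | nil => simp [pvALoop]
  | cons l rest ih =>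
    by_cases hb : PySem.Chars.strip l = []
    · simp [pvALoop, hb, pvBlank, ih]
    · by_cases hi : b ≤ l.length - (PySem.Chars.lstrip l).length
      · simp [pvALoop, hb, hi, pvBlank, pvIndent, ih]
      · simp [pvALoop, hb, hi, pvBlank, pvIndent]

-- Phase 1 of A (no base yet, in_block false) is dropWhile-blank then phase 2.
theorem pvALoop_phase1 (ls : List (List Char)) :
    pvALoop ls [] false none =
      match ls.dropWhile pvBlank with
      | [] => []
      | h :: rest => h :: rest.takeWhile (fun l => pvBlank l || decide (pvIndent h ≤ pvIndent l)) := by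
  induction ls with
  | nil => simp [pvALoop]
  | cons l rest ih =>
    by_cases hb : PySem.Chars.strip l = []
    · simpa [pvALoop, hb, List.dropWhile_cons, pvBlank] using ih
    · simp [pvALoop, hb, pvBlank, pvIndent,
        pvALoop_phase2 rest [l] (l.length - (PySem.Chars.lstrip l).length)]

-- ===== VERDICT (by name: the statement is the Claim_ definition above) =====
theorem extract_indented_block_py_spec : Claim_equal_extract_indented_block_py := by
  intro source start _
  unfold Spec_extract_indented_block_py extract_indented_block_py extract_indented_block_py_alt
  set lines := PySem.Chars.splitOn (PySem.List.slice source.toList (some start) none) ['\n'] with hl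
  by_cases hnil : lines = []
  · simp [hnil]
  · simp only [hnil, if_false]
    rw [pvALoop_phase1]
    cases hdw : (lines.drop 1).dropWhile pvBlank with
    | nil => simp [PySem.Chars.join, List.intercalate]
    | cons h rest =>
      have hpred : PySem.Chars.strip h = [] ∨
          h.length ≤ h.length - (PySem.Chars.lstrip h).length + (PySem.Chars.lstrip h).length :=
        Or.inr (by omega)
      simp [pvBlank, pvIndent, hpred]
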